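-- pv_equiv track=rewrite | github.com/wlgud0402/dailyalgo | programmers/level2/귤 고르기.py | solution
-- ===== SOURCE A (Python) =====
-- from collections import Counter
--
-- def solution(k, tangerine):
--     # 귤의 크기를 key로 갖고 갯수를 세어 dict를 생성합니다
--     fruit_map = Counter(tangerine)
--
--     # 갯수를 기준으로 내림차순으로 정랼한 key,value 배열을 생성합니다.
--     sorted_fruit_items = sorted(
--         fruit_map.items(), key=lambda item: item[1], reverse=True)
--
--     kind = 0
--     for fruit_item in sorted_fruit_items:
--         # k개를 모두 고른 경우 for문 break
--         if k <= 0: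
--             break
--
--         # 현재 확인하는 귤의 갯수를 최대로 사용해야 종류를 가장 적게 고를 수 있으므로 갯수를 모두 빼줍니다.
--         # 종류를 +1 해줍니다
--         k -= fruit_item[1]
--         kind += 1
--
--     return kind
-- ===== SOURCE B (Python) =====
-- from collections import Counter
--
-- def solution(k, tangerine):
--     # Bucket the frequencies by count instead of sorting them.
--     counts = Counter(tangerine)
--     if not counts:
--         return 0
--     m = max(counts.values())
--     bucket = [0] * (m + 1)
--     for c in counts.values():
--         bucket[c] += 1
--     kind = 0
--     for c in reversed(range(1, m + 1)):
--         for _ in range(bucket[c]):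
--             if k <= 0:
--                 return kind
--             k -= c
--             kind += 1
--     return kind
-- ===== Notes on version B (the rewrite author's own statement) =====
-- stated objective: alternative
-- what changed: B replaces sorting the (size,count) items by count with a bucket array indexed by count walked from the highest count down, removing the sort.
import Mathlib
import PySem

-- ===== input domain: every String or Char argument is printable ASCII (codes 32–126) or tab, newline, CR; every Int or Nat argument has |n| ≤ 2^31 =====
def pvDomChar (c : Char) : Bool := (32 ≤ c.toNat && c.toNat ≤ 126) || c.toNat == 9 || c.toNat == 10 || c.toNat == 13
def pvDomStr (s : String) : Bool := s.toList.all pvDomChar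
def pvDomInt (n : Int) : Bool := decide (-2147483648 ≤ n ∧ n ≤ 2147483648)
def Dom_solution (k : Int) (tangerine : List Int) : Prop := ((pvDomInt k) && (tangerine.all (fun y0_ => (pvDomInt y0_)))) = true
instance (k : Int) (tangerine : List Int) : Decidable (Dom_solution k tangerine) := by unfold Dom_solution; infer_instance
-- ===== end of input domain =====

-- B buckets the frequencies by count and walks the buckets from the highest count down instead of sorting the items by count (alternative algorithm, same value).

-- ===== PORT A =====
-- Counter + sort items by count descending + greedy scan (the loop's break is the
-- state-preserving branch: once k ≤ 0 nothing changes any more).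
def solution (k : Int) (tangerine : List Int) : Int :=
  let fruit_map := PySem.Dict.counter tangerine
  let sorted_fruit_items := PySem.List.sorted fruit_map.items (fun item => item.2) true
  (sorted_fruit_items.foldl
    (fun s fruit_item => if s.1 ≤ 0 then s else (s.1 - fruit_item.2, s.2 + 1))
    (k, (0 : Int))).2

-- ===== PORT B =====
-- Counter, then a bucket array indexed by count, walked from the highest count down.
-- `if not counts: return 0` is the `none` branch of max?; the nested
-- `for c in reversed(range(1, m+1)): for _ in range(bucket[c])` loop is the fold over the
-- flatMap of replicates; the early `return kind` is again the state-preserving branch.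
def solution_alt (k : Int) (tangerine : List Int) : Int :=
  let counts := PySem.Dict.counter tangerine
  match PySem.List.max? counts.values (fun v => v) with
  | none => 0
  | some m =>
    let bucket := counts.values.foldl
      (fun b c => b.set c.toNat (b.getD c.toNat 0 + 1))
      (List.replicate (m.toNat + 1) (0 : Int))
    (((PySem.List.pyRange 1 (m + 1)).reverse.flatMap
        (fun c => List.replicate (bucket.getD c.toNat 0).toNat c)).foldl
      (fun s c => if s.1 ≤ 0 then s else (s.1 - c, s.2 + 1)) (k, (0 : Int))).2

-- ===== PRECONDITION & SPEC =====
def Spec_solution (k : Int) (tangerine : List Int) (out : Int) : Prop := out = solution_alt k tangerine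
instance (k : Int) (tangerine : List Int) (out : Int) : Decidable (Spec_solution k tangerine out) := by unfold Spec_solution; infer_instance

-- ===== CLAIM (what is proved, stated in full; the proofs are below) =====
def Claim_equal_solution : Prop := ∀ (k : Int) (tangerine : List Int), Dom_solution k tangerine → Spec_solution k tangerine (solution k tangerine)

-- ===== LEMMAS AND PROOFS =====

-- the counting fold keeps the bucket's length
lemma pvFoldSetLen (vs : List Int) (b : List Int) :
    (vs.foldl (fun b c => b.set c.toNat (b.getD c.toNat 0 + 1)) b).length = b.length := by
  induction vs generalizing b with
  | nil => rfl
  | cons v vs ih => rw [List.foldl_cons, ih, List.length_set]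

-- the counting fold adds the multiplicity of i to slot i
lemma pvBucketCount (vs : List Int) (b : List Int)
    (hvs : ∀ v ∈ vs, 0 ≤ v ∧ v.toNat < b.length) (i : Int) (hi : 0 ≤ i)
    (hib : i.toNat < b.length) :
    (vs.foldl (fun b c => b.set c.toNat (b.getD c.toNat 0 + 1)) b).getD i.toNat 0
      = b.getD i.toNat 0 + vs.count i := by
  induction vs generalizing b with
  | nil => simp
  | cons v vs ih =>
    obtain ⟨hv0, hvl⟩ := hvs v (by simp)
    have hlen : (b.set v.toNat (b.getD v.toNat 0 + 1)).length = b.length := by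
      simp
    rw [List.foldl_cons,
      ih _ (fun w hw => by rw [hlen]; exact hvs w (List.mem_cons_of_mem _ hw))
        (by rw [hlen]; exact hib)]
    have hset : ∀ j, (b.set v.toNat (b.getD v.toNat 0 + 1)).getD j 0
        = if v.toNat = j then b.getD v.toNat 0 + 1 else b.getD j 0 := by
      intro j
      simp only [List.getD_eq_getElem?_getD, List.getElem?_set, hvl, if_true]
      by_cases h : v.toNat = j <;> simp [h]
    rw [hset i.toNat]
    by_cases hvi : v = i
    · subst hvi
      rw [if_pos rfl, List.count_cons_self]
      push_cast
      ring
    · have hne : v.toNat ≠ i.toNat := by omega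
      rw [if_neg hne]
      simp [hvi]

-- multiplicity of v in the flattened bucket walk
lemma pvCountFlatMapRep (l : List Int) (g : Int → Nat) (v : Int) (hl : l.Nodup) :
    (l.flatMap (fun c => List.replicate (g c) c)).count v
      = if v ∈ l then g v else 0 := by
  induction l with
  | nil => simp
  | cons c l ih =>
    rw [List.nodup_cons] at hl
    rw [List.flatMap_cons, List.count_append, List.count_replicate, ih hl.2]
    by_cases hvc : v = c
    · subst hvc
      simp [hl.1]
    · simp [hvc, Ne.symm hvc]

-- the two count sequences (sorted-descending values vs bucket walk) are the same list
lemma pvListsEq (t : List Int) (m : Int)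
    (h : PySem.List.max? (PySem.Dict.counter t).values (fun v => v) = some m) :
    ((PySem.List.sorted (PySem.Dict.counter t).items (fun item => item.2) true).map (·.2))
      = (PySem.List.pyRange 1 (m + 1)).reverse.flatMap
          (fun c => List.replicate
            ((((PySem.Dict.counter t).values.foldl
                (fun b c => b.set c.toNat (b.getD c.toNat 0 + 1))
                (List.replicate (m.toNat + 1) (0 : Int))).getD c.toNat 0).toNat) c) := by
  set vs := (PySem.Dict.counter t).values with hvsdef
  have hvals : vs = (PySem.Set.ofList t).map (fun x => ((t.count x : Int))) := by
    simp [hvsdef, PySem.Dict.values, PySem.Dict.items_counter]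
  have hmem : ∀ v ∈ vs, 1 ≤ v ∧ v ≤ m := by
    intro v hv
    refine ⟨?_, PySem.List.max?_isMax h v hv⟩
    rw [hvals] at hv
    obtain ⟨x, hx, rfl⟩ := List.mem_map.mp hv
    have : x ∈ t := (PySem.Set.mem_ofList t x).mp hx
    have := List.count_pos_iff.mpr this
    omega
  set bucket := vs.foldl (fun b c => b.set c.toNat (b.getD c.toNat 0 + 1))
      (List.replicate (m.toNat + 1) (0 : Int)) with hbdef
  have hblen : bucket.length = m.toNat + 1 := by
    rw [hbdef, pvFoldSetLen]; simp
  have hbget : ∀ c : Int, 0 ≤ c → c.toNat < m.toNat + 1 →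
      bucket.getD c.toNat 0 = vs.count c := by
    intro c hc0 hcl
    rw [hbdef, pvBucketCount vs _ ?_ c hc0
      (by simp only [List.length_replicate]; exact hcl)]
    · rw [List.getD_replicate _ hcl]
      simp
    · intro v hv
      obtain ⟨h1, h2⟩ := hmem v hv
      refine ⟨by omega, ?_⟩
      simp only [List.length_replicate]
      omega
  -- range facts
  have hrngnd : ((PySem.List.pyRange 1 (m + 1)).reverse).Nodup := by
    simp [List.nodup_reverse]
    exact (PySem.List.pairwise_lt_pyRange_one 1 (m + 1)).nodup
  -- left side sorted (non-increasing)
  have hLsort : (((PySem.List.sorted (PySem.Dict.counter t).items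
      (fun item => item.2) true).map (·.2)).Pairwise (fun a b => b ≤ a)) := by
    rw [List.pairwise_map]
    exact PySem.List.sorted_pairwise_rev _ _
  -- right side sorted (non-increasing)
  have hRsort : (((PySem.List.pyRange 1 (m + 1)).reverse.flatMap
      (fun c => List.replicate ((bucket.getD c.toNat 0).toNat) c)).Pairwise
        (fun a b => b ≤ a)) := by
    rw [List.flatMap_def, List.pairwise_flatten]
    constructor
    · intro l hl
      obtain ⟨c, _, rfl⟩ := List.mem_map.mp hl
      exact List.pairwise_replicate.mpr (Or.inr le_rfl)
    · rw [List.pairwise_map]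
      have : ((PySem.List.pyRange 1 (m + 1)).reverse).Pairwise (fun a b => b < a) := by
        rw [List.pairwise_reverse]
        exact PySem.List.pairwise_lt_pyRange_one 1 (m + 1)
      refine this.imp_of_mem ?_
      intro a b _ _ hab x hx y hy
      rw [List.eq_of_mem_replicate hx, List.eq_of_mem_replicate hy]
      omega
  -- permutation: both are permutations of vs
  have hLperm : (((PySem.List.sorted (PySem.Dict.counter t).items
      (fun item => item.2) true).map (·.2)).Perm vs) := by
    have := (PySem.List.sorted_perm (PySem.Dict.counter t).items
      (fun item => item.2) true).map (·.2)
    simpa [hvsdef, PySem.Dict.values] using this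
  have hRperm : (((PySem.List.pyRange 1 (m + 1)).reverse.flatMap
      (fun c => List.replicate ((bucket.getD c.toNat 0).toNat) c)).Perm vs) := by
    rw [List.perm_iff_count]
    intro v
    rw [pvCountFlatMapRep _ _ _ hrngnd]
    by_cases hv : v ∈ (PySem.List.pyRange 1 (m + 1)).reverse
    · have hv' : 1 ≤ v ∧ v < m + 1 := by
        rw [List.mem_reverse, PySem.List.mem_pyRange_one] at hv
        exact hv
      rw [if_pos hv, hbget v (by omega) (by omega)]
      omega
    · rw [if_neg hv]
      rw [List.mem_reverse, PySem.List.mem_pyRange_one] at hv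
      push Not at hv
      symm
      rw [List.count_eq_zero]
      intro hvv
      have := hmem v hvv
      omega
  exact (hLperm.trans hRperm.symm).eq_of_pairwise
    (fun a b _ _ h1 h2 => le_antisymm h2 h1) hLsort hRsort

-- ===== VERDICT (by name: the statement is the Claim_ definition above) =====
theorem solution_spec : Claim_equal_solution := by
  intro k t _
  unfold Spec_solution solution solution_alt
  dsimp only
  cases h : PySem.List.max? (PySem.Dict.counter t).values (fun v => v) with
  | none =>
    have hvs : (PySem.Dict.counter t).values = [] :=
      (PySem.List.max?_eq_none_iff _ _).mp h
    have hitems : (PySem.Dict.counter t).items = [] := by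
      have := hvs
      simpa [PySem.Dict.values, List.map_eq_nil_iff] using this
    rw [(PySem.List.sorted_eq_nil_iff _ _ _).mpr hitems]
    rfl
  | some m =>
    rw [← List.foldl_map (f := fun it : Int × Int => it.2)
      (g := fun (s : Int × Int) c => if s.1 ≤ 0 then s else (s.1 - c, s.2 + 1))]
    rw [pvListsEq t m h]
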